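-- pv_equiv track=rewrite | github.com/amcc1996/advent-of-code-2024 | day21/main_old_v2.py | parse_dir_code
-- ===== SOURCE A (Python) =====
-- def parse_dir_code(code, map_direction_and_position_to_directions):
--     sequence_list = ['']
--     start_pos = 'A'
--     for char in code:
--         parsed_code = map_direction_and_position_to_directions[char][start_pos]
--         aux = []
--         for sequence in sequence_list:
--             for parsed in parsed_code:
--                 aux.append(sequence + parsed)
--         sequence_list = [x for x in aux]
--         start_pos = char
--
--     return sequence_list
-- ===== SOURCE B (Python) =====
-- def parse_dir_code(code, map_direction_and_position_to_directions):
--     # Pass 1: build the per-character option table.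
--     options = []
--     start_pos = 'A'
--     for char in code:
--         options.append(map_direction_and_position_to_directions[char][start_pos])
--         start_pos = char
--
--     # Pass 2: Cartesian product of the option lists (first character varies slowest).
--     def product(opts):
--         if not opts:
--             return [[]]
--         return [[x] + rest for x in opts[0] for rest in product(opts[1:])]
--
--     return [''.join(combo) for combo in product(options)]
-- ===== Notes on version B (the rewrite author's own statement) =====
-- stated objective: alternative
-- what changed: A interleaves lookup and combination in one pass, rebuilding the whole sequence list at every character; B first builds the per-character option table in one pass and then forms the Cartesian product by structural recursion on that table, joining each combination at the end.
import Mathlib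
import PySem

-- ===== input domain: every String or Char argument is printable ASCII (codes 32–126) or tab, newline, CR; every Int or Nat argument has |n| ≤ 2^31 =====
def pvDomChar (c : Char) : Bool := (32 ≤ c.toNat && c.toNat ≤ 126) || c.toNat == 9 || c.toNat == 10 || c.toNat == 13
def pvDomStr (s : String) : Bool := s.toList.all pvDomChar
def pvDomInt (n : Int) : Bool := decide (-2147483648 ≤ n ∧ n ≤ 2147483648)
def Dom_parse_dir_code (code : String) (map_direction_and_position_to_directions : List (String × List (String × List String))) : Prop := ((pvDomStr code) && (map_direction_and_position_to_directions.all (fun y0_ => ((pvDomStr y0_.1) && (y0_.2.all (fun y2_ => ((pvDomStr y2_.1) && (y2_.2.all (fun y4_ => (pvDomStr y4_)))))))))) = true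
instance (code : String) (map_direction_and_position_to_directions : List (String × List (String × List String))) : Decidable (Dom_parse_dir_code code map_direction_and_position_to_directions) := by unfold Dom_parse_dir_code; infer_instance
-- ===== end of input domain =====

-- B replaces A's single interleaved pass (lookup + rebuild the whole sequence list per character)
-- by a two-pass decomposition: build the per-character option table, then take its Cartesian
-- product by structural recursion and join each combination (objective: alternative, same cost).

-- ===== PORT A =====
-- map_…[char][start_pos] made total: first-match association-list lookup; a missing key is a
-- Python KeyError, excluded by Pre_parse_dir_code below.
def pvLookup (map_d : List (String × List (String × List String))) (c : Char) (pos : String) : List String :=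
  (((map_d.lookup (String.singleton c)).getD []).lookup pos).getD []

def parse_dir_code (code : String) (map_direction_and_position_to_directions : List (String × List (String × List String))) : List String :=
  (code.toList.foldl
    (fun (st : List String × String) char =>
      let parsed_code := pvLookup map_direction_and_position_to_directions char st.2
      let aux := st.1.foldl
        (fun aux sequence =>
          parsed_code.foldl (fun aux parsed => aux ++ [sequence ++ parsed]) aux) []
      (aux.map (fun x => x), String.singleton char))
    ([""], "A")).1

-- ===== PORT B =====
-- product(opts): [] ↦ [[]]; opts₀ :: rest ↦ [[x] + r for x in opts₀ for r in product(rest)]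
def pvProduct : List (List String) → List (List String)
  | [] => [[]]
  | opts :: rest => opts.flatMap (fun x => (pvProduct rest).map (fun r => x :: r))

-- ''.join(combo): fold of string concatenation over the combination (exact for str lists)
def pvJoin (combo : List String) : String := combo.foldl (· ++ ·) ""

def parse_dir_code_alt (code : String) (map_direction_and_position_to_directions : List (String × List (String × List String))) : List String :=
  let options := (code.toList.foldl
    (fun (st : List (List String) × String) char =>
      (st.1 ++ [pvLookup map_direction_and_position_to_directions char st.2], String.singleton char))
    ([], "A")).1
  (pvProduct options).map (fun combo => pvJoin combo)

-- ===== PRECONDITION & SPEC =====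
-- Pre_ excludes exactly the inputs on which Python A raises KeyError: some character of code
-- (paired with its predecessor position, 'A' first) misses a key in the two-level dict.
def Pre_parse_dir_code (code : String) (map_direction_and_position_to_directions : List (String × List (String × List String))) : Prop :=
  ∀ p ∈ code.toList.zip ("A" :: code.toList.map String.singleton),
    ((map_direction_and_position_to_directions.lookup (String.singleton p.1)).elim false
      (fun d => (d.lookup p.2).isSome)) = true
instance (code : String) (map_direction_and_position_to_directions : List (String × List (String × List String))) : Decidable (Pre_parse_dir_code code map_direction_and_position_to_directions) := by unfold Pre_parse_dir_code; infer_instance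

def pvWitness_parse_dir_code : String × (List (String × List (String × List String))) :=
  ("AB", [("A", [("A", ["<v", "v<"])]), ("B", [("A", [">"]), ("A", ["^"])])])

def Spec_parse_dir_code (code : String) (map_direction_and_position_to_directions : List (String × List (String × List String))) (out : List String) : Prop := out = parse_dir_code_alt code map_direction_and_position_to_directions
instance (code : String) (map_direction_and_position_to_directions : List (String × List (String × List String))) (out : List String) : Decidable (Spec_parse_dir_code code map_direction_and_position_to_directions out) := by unfold Spec_parse_dir_code; infer_instance

-- ===== CLAIM (what is proved, stated in full; the proofs are below) =====
def Claim_equal_parse_dir_code : Prop := ∀ (code : String) (map_direction_and_position_to_directions : List (String × List (String × List String))), Dom_parse_dir_code code map_direction_and_position_to_directions → Pre_parse_dir_code code map_direction_and_position_to_directions → Spec_parse_dir_code code map_direction_and_position_to_directions (parse_dir_code code map_direction_and_position_to_directions)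

-- ===== LEMMAS AND PROOFS =====

-- the option table B's first pass computes, by recursion on the remaining characters
def pvOptsFrom (map_d : List (String × List (String × List String))) : List Char → String → List (List String)
  | [], _ => []
  | c :: cs, pos => pvLookup map_d c pos :: pvOptsFrom map_d cs (String.singleton c)

theorem pvOpts_fold (map_d : List (String × List (String × List String))) (cs : List Char)
    (acc : List (List String)) (pos : String) :
    (cs.foldl
      (fun (st : List (List String) × String) char =>
        (st.1 ++ [pvLookup map_d char st.2], String.singleton char)) (acc, pos)).1
      = acc ++ pvOptsFrom map_d cs pos := by
  induction cs generalizing acc pos with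
  | nil => simp [pvOptsFrom]
  | cons c cs ih => simp [pvOptsFrom, ih]

theorem pvJoin_shift (l : List String) (a : String) :
    l.foldl (· ++ ·) a = a ++ l.foldl (· ++ ·) "" := by
  induction l generalizing a with
  | nil => simp
  | cons x l ih =>
    simp only [List.foldl_cons]
    rw [ih (a ++ x), ih ("" ++ x)]
    simp [String.append_assoc]

theorem pvJoin_cons (x : String) (l : List String) : pvJoin (x :: l) = x ++ pvJoin l := by
  simp only [pvJoin, List.foldl_cons]
  rw [pvJoin_shift l ("" ++ x)]; simp

theorem pvA_fold (map_d : List (String × List (String × List String))) (cs : List Char)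
    (sl : List String) (pos : String) :
    (cs.foldl
      (fun (st : List String × String) char =>
        let parsed_code := pvLookup map_d char st.2
        let aux := st.1.foldl
          (fun aux sequence =>
            parsed_code.foldl (fun aux parsed => aux ++ [sequence ++ parsed]) aux) []
        (aux.map (fun x => x), String.singleton char)) (sl, pos)).1
      = sl.flatMap (fun s => (pvProduct (pvOptsFrom map_d cs pos)).map (fun combo => s ++ pvJoin combo)) := by
  induction cs generalizing sl pos with
  | nil => simp [pvOptsFrom, pvProduct, pvJoin]
  | cons c cs ih =>
    simp only [List.foldl_cons]
    rw [ih]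
    simp only [pvOptsFrom, pvProduct, PySem.List.foldl_append_singleton_eq_map,
      PySem.List.foldl_append_eq_flatMap, List.map_id']
    simp [List.flatMap_map, List.map_flatMap, List.map_map, List.flatMap_assoc]
    simp [Function.comp_def, pvJoin_cons, String.append_assoc]

-- ===== VERDICT (by name: the statement is the Claim_ definition above) =====
theorem parse_dir_code_spec : Claim_equal_parse_dir_code := by
  intro code map_d _ _
  show parse_dir_code code map_d = parse_dir_code_alt code map_d
  simp only [parse_dir_code, parse_dir_code_alt]
  rw [pvA_fold, pvOpts_fold]
  simp
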